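-- pv_equiv track=rewrite | github.com/AlexClowes/advent_of_code | 2020/24/conways_tiles.py | split_dirs
-- ===== SOURCE A (Python) =====
-- def split_dirs(directions):
--     pos = 0
--     while pos < len(directions):
--         if directions[pos] in "ns":
--             yield directions[pos : pos + 2]
--             pos += 2
--         else:
--             yield directions[pos]
--             pos += 1
-- ===== SOURCE B (Python) =====
-- def split_dirs(directions):
--     # Finite-state machine: one character at a time, no lookahead and no slicing.
--     # An 'n'/'s' is remembered as pending state; the next character (whatever it
--     # is) completes it; a pending char left at end of input is emitted alone.
--     out = []
--     pending = None
--     for c in directions: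
--         if pending is not None:
--             out.append(pending + c)
--             pending = None
--         elif c in "ns":
--             pending = c
--         else:
--             out.append(c)
--     if pending is not None:
--         out.append(pending)
--     yield from out
-- ===== Notes on version B (the rewrite author's own statement) =====
-- stated objective: alternative
-- what changed: Replaced A's lookahead index-walk (test s[pos], slice two characters at once, jump pos by 2) with a one-character-at-a-time finite-state machine that never looks ahead or slices: an 'n'/'s' is stored as pending state and fused with the following character when it arrives, with a flush of a leftover pending char at end of input.
import Mathlib
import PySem

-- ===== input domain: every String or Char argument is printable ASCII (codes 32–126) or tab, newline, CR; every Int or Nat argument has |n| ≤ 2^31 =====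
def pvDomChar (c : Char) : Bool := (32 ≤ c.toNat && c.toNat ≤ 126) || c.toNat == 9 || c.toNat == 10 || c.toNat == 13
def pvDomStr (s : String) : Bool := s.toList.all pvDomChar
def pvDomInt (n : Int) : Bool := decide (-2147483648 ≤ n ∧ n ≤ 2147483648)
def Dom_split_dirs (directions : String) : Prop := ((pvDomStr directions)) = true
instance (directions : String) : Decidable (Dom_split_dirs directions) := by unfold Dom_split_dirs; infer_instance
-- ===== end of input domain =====

-- B replaces A's lookahead index-walk with slices by a no-lookahead finite-state machine
-- carrying a pending 'n'/'s' character (alternative decomposition; same cost).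
-- Both ports compare the outputs as the LIST of yielded tokens (the Python functions are generators).

-- ===== PORT A =====
-- A's while-loop over positions; pos stays a Nat (Python's pos starts at 0 and only increases).
def split_dirs_go (cs : List Char) (pos : Nat) : List String :=
  if h : pos < cs.length then
    if cs[pos] = 'n' ∨ cs[pos] = 's' then
      -- directions[pos : pos + 2]
      String.ofList (PySem.List.slice cs (some (pos : Int)) (some ((pos : Int) + 2)))
        :: split_dirs_go cs (pos + 2)
    else
      String.ofList [cs[pos]] :: split_dirs_go cs (pos + 1)
  else []
termination_by cs.length - pos

def split_dirs (directions : String) : List String :=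
  split_dirs_go directions.toList 0

-- ===== PORT B =====
-- B's for-loop as structural recursion over the characters with the same state: the
-- Option Char is B's `pending`; the final flush is the `if pending is not None` after the loop.
def split_dirs_alt_go : List Char → Option Char → List String
  | [], none => []
  | [], some p => [String.ofList [p]]
  | c :: rest, some p => String.ofList [p, c] :: split_dirs_alt_go rest none
  | c :: rest, none =>
    if c = 'n' ∨ c = 's' then split_dirs_alt_go rest (some c)
    else String.ofList [c] :: split_dirs_alt_go rest none

def split_dirs_alt (directions : String) : List String :=
  split_dirs_alt_go directions.toList none

-- ===== PRECONDITION & SPEC =====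
def Spec_split_dirs (directions : String) (out : List String) : Prop := out = split_dirs_alt directions
instance (directions : String) (out : List String) : Decidable (Spec_split_dirs directions out) := by unfold Spec_split_dirs; infer_instance

-- ===== CLAIM (what is proved, stated in full; the proofs are below) =====
def Claim_equal_split_dirs : Prop := ∀ (directions : String), Dom_split_dirs directions → Spec_split_dirs directions (split_dirs directions)

-- ===== LEMMAS AND PROOFS =====

theorem split_dirs_go_eq_alt (cs : List Char) (pos : Nat) :
    split_dirs_go cs pos = split_dirs_alt_go (cs.drop pos) none := by
  induction pos using split_dirs_go.induct (cs := cs) with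
  | case1 pos h hns ih =>
    rw [split_dirs_go]
    have hdrop : cs.drop pos = cs[pos] :: cs.drop (pos + 1) :=
      List.drop_eq_getElem_cons h
    have hslice : PySem.List.slice cs (some (pos : Int)) (some ((pos : Int) + 2))
        = (cs.drop pos).take 2 := by
      have := PySem.List.slice_natCast_add cs pos 2
      simpa using this
    simp only [h, hns, if_pos, dif_pos]
    rw [hdrop, split_dirs_alt_go]
    simp only [hns, if_pos]
    rcases hd1 : cs.drop (pos + 1) with _ | ⟨d, rest'⟩
    · -- last character: slice of length 1, pending flushed at end of input
      have htake : (cs.drop pos).take 2 = [cs[pos]] := by rw [hdrop, hd1]; rfl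
      have hd2 : cs.drop (pos + 2) = [] := List.drop_eq_nil_of_le (by
        have := List.drop_eq_nil_iff.mp hd1
        omega)
      rw [hslice, htake, ih, hd2]
      rfl
    · have htake : (cs.drop pos).take 2 = [cs[pos], d] := by rw [hdrop, hd1]; rfl
      have hd2 : cs.drop (pos + 2) = rest' := by
        have h2 := congrArg (List.drop 1) hd1
        rw [List.drop_drop] at h2
        simpa using h2
      rw [hslice, htake, ih, hd2]
      rfl
  | case2 pos h hns ih =>
    rw [split_dirs_go]
    have hdrop : cs.drop pos = cs[pos] :: cs.drop (pos + 1) :=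
      List.drop_eq_getElem_cons h
    simp only [h, dif_pos, hns, if_false]
    rw [hdrop, split_dirs_alt_go]
    simp only [hns, if_false]
    rw [ih]
  | case3 pos h =>
    rw [split_dirs_go]
    have : cs.drop pos = [] := List.drop_eq_nil_of_le (by omega)
    simp [h, this, split_dirs_alt_go]

-- ===== VERDICT (by name: the statement is the Claim_ definition above) =====
theorem split_dirs_spec : Claim_equal_split_dirs := by
  intro directions _
  unfold Spec_split_dirs split_dirs split_dirs_alt
  simpa using split_dirs_go_eq_alt directions.toList 0
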